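-- pv_equiv track=rewrite | github.com/armsky/Preps | Bloomberg/Kill Process.py | killProcess
-- ===== SOURCE A (Python) =====
-- def killProcess(pid, ppid, kill):
--     d = {}
--     for i in range(len(pid)):
--         p = pid[i]
--         pp = ppid[i]
--         if pp not in d:
--             d[pp] = [p]
--         else:
--             d[pp].append(p)
--     res = [kill]
--     if kill in d:   #XXX IMPORTANT XXX
--         q = d[kill]
--         while q:
--             p = q.pop()
--             res.append(p)
--             if p in d:
--                 q += d[p]
--     return res
-- ===== SOURCE B (Python) =====
-- def killProcess(pid, ppid, kill):
--     children = {}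
--     for pp, p in zip(ppid, pid):
--         children[pp] = children.get(pp, []) + [p]
--
--     def collect(node):
--         out = [node]
--         for c in reversed(children.get(node, [])):
--             out += collect(c)
--         return out
--
--     return collect(kill)
-- ===== Notes on version B (the rewrite author's own statement) =====
-- stated objective: simpler
-- what changed: The index loop over range(len(pid)) becomes a single zip pass building the child map, and A's explicit mutable stack (pop / extend, which also aliases and mutates d[kill]) is replaced by a pure recursive collect that returns [node] plus the collected subtrees of the children in reversed insertion order.
-- outside the precondition, e.g. on killProcess([0], [0], 0): A returns [0, 0], B raises RecursionError; on killProcess([2, 1], [1, 2], 1): A returns [1, 2, 1], B raises RecursionError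
import Mathlib
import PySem

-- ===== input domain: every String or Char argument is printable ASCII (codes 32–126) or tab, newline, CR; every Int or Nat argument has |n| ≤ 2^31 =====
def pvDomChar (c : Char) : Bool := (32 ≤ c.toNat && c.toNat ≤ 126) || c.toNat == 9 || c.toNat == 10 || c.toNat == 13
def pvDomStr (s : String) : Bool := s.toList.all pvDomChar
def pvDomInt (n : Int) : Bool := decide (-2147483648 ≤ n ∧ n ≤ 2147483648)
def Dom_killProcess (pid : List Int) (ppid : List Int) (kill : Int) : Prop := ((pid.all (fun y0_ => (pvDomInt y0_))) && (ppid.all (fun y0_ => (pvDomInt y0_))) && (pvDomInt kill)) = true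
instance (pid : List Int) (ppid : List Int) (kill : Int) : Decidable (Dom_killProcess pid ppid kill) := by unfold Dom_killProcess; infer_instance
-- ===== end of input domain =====

-- B replaces A's index loop and explicit mutable stack by a zip pass and a pure
-- recursive collect over the child map (same return value; A also mutates its local
-- dict entry d[kill] through aliasing, which is invisible to the caller).

-- ===== PORT A =====
-- the dict-building step of A's first loop: `if pp not in d: d[pp]=[p] else: d[pp].append(p)`
def pvStepA (d : PySem.Dict Int (List Int)) (pp p : Int) : PySem.Dict Int (List Int) :=
  match d.get? pp with
  | none => d.insert pp [p]
  | some l => d.insert pp (l ++ [p])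

-- `for i in range(len(pid)): p = pid[i]; pp = ppid[i]; …`  (indices are in range on Pre_ inputs)
def pvBuildA (pid ppid : List Int) : PySem.Dict Int (List Int) :=
  (PySem.List.pyRange 0 pid.length 1).foldl
    (fun d i =>
      let p := PySem.List.pyGetD pid i 0
      let pp := PySem.List.pyGetD ppid i 0
      pvStepA d pp p) PySem.Dict.empty

-- A's `while q:` loop; fuel is a step counter, large enough on Pre_ inputs (proved below)
def pvLoopA (d : PySem.Dict Int (List Int)) : Nat → List Int → List Int → List Int
  | 0, res, _ => res
  | fuel+1, res, q =>
    if q.isEmpty then res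
    else
      let p := q.getLast?.getD 0          -- p = q.pop()
      let q1 := q.dropLast
      let res1 := res ++ [p]              -- res.append(p)
      if d.contains p then pvLoopA d fuel res1 (q1 ++ d.getD p [])   -- q += d[p]
      else pvLoopA d fuel res1 q1

def killProcess (pid : List Int) (ppid : List Int) (kill : Int) : List Int :=
  let d := pvBuildA pid ppid
  if d.contains kill then
    pvLoopA d ((pid.length + 1) ^ (pid.length + 1) + 1) [kill] (d.getD kill [])
  else [kill]

-- ===== PORT B =====
-- `for pp, p in zip(ppid, pid): children[pp] = children.get(pp, []) + [p]`
def pvBuildB (pid ppid : List Int) : PySem.Dict Int (List Int) :=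
  (ppid.zip pid).foldl (fun d e => d.insert e.1 (d.getD e.1 [] ++ [e.2])) PySem.Dict.empty

-- `def collect(node): out = [node]; for c in reversed(children.get(node, [])): out += collect(c); return out`
-- fuel bounds the recursion depth; pid.length + 1 suffices on Pre_ inputs (proved below)
def pvCollect (d : PySem.Dict Int (List Int)) : Nat → Int → List Int
  | 0, node => [node]
  | fuel+1, node => node :: ((d.getD node []).reverse.flatMap (pvCollect d fuel))

def killProcess_alt (pid : List Int) (ppid : List Int) (kill : Int) : List Int :=
  pvCollect (pvBuildB pid ppid) (pid.length + 1) kill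

-- ===== PRECONDITION & SPEC =====
-- children of v in row order (what both programs' dicts store at key v)
def pvChildren (pid ppid : List Int) (v : Int) : List Int :=
  (((ppid.zip pid)).filter (fun e => e.1 == v)).map (·.2)

-- one closure step of the parent→child edge set
def pvStepR (pid ppid : List Int) (S : Finset Int) : Finset Int :=
  S ∪ S.biUnion (fun v => (pvChildren pid ppid v).toFinset)

-- every process reachable from v (pid.length+1 closure steps reach the fixed point, proved below)
def pvReach (pid ppid : List Int) (v : Int) : Finset Int :=
  (pvStepR pid ppid)^[pid.length + 1] {v}

-- Pre_ excludes tables whose rows raise IndexError in A (pid longer than ppid), and tables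
-- with a cycle among the processes reachable from kill: on those A either loops forever or
-- returns an accidental list truncated by its stack aliasing d[kill], while B's recursion
-- raises RecursionError.
def Pre_killProcess (pid : List Int) (ppid : List Int) (kill : Int) : Prop :=
  pid.length ≤ ppid.length ∧
    ∀ v ∈ pvReach pid ppid kill, ∀ c ∈ pvChildren pid ppid v, v ∉ pvReach pid ppid c

instance (pid : List Int) (ppid : List Int) (kill : Int) : Decidable (Pre_killProcess pid ppid kill) := by
  unfold Pre_killProcess; infer_instance

def pvWitness_killProcess : List Int × List Int × Int := ([3, 1, 5, 10], [0, 3, 3, 5], 3)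

def Spec_killProcess (pid : List Int) (ppid : List Int) (kill : Int) (out : List Int) : Prop := out = killProcess_alt pid ppid kill
instance (pid : List Int) (ppid : List Int) (kill : Int) (out : List Int) : Decidable (Spec_killProcess pid ppid kill out) := by unfold Spec_killProcess; infer_instance

-- ===== CLAIM (what is proved, stated in full; the proofs are below) =====
def Claim_equal_killProcess : Prop := ∀ (pid : List Int) (ppid : List Int) (kill : Int), Dom_killProcess pid ppid kill → Pre_killProcess pid ppid kill → Spec_killProcess pid ppid kill (killProcess pid ppid kill)

-- ===== LEMMAS AND PROOFS =====

theorem pvChildren_mem_pid (pid ppid : List Int) (v c : Int) (h : c ∈ pvChildren pid ppid v) : c ∈ pid := by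
  unfold pvChildren at h
  obtain ⟨e, he, rfl⟩ := List.mem_map.mp h
  exact (List.of_mem_zip (List.mem_filter.mp he).1).2

theorem pvStepR_mono (pid ppid : List Int) (S S' : Finset Int) (h : S ⊆ S') :
    pvStepR pid ppid S ⊆ pvStepR pid ppid S' :=
  Finset.union_subset_union h (Finset.biUnion_subset_biUnion_of_subset_left _ h)

theorem pvStepR_infl (pid ppid : List Int) (S : Finset Int) : S ⊆ pvStepR pid ppid S :=
  Finset.subset_union_left

theorem pvIter_le (pid ppid : List Int) (v : Int) (n m : Nat) (h : n ≤ m) :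
    (pvStepR pid ppid)^[n] {v} ⊆ (pvStepR pid ppid)^[m] {v} := by
  induction m with
  | zero => have : n = 0 := by omega
            subst this; exact fun x hx => hx
  | succ m ih =>
    rcases Nat.lt_or_ge n (m+1) with hlt | hge
    · have h1 := ih (by omega)
      rw [Function.iterate_succ_apply']
      exact h1.trans (pvStepR_infl ..)
    · have : n = m + 1 := by omega
      subst this; exact fun x hx => hx

theorem pvIter_bound (pid ppid : List Int) (v : Int) (n : Nat) :
    (pvStepR pid ppid)^[n] {v} ⊆ insert v pid.toFinset := by
  induction n with
  | zero => simp
  | succ n ih =>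
    rw [Function.iterate_succ_apply']
    unfold pvStepR
    apply Finset.union_subset ih
    apply Finset.biUnion_subset.mpr
    intro x _ c hc
    rw [List.mem_toFinset] at hc
    exact Finset.mem_insert_of_mem (List.mem_toFinset.mpr (pvChildren_mem_pid pid ppid x c hc))

theorem pvIter_card (pid ppid : List Int) (v : Int) (n : Nat) :
    ((pvStepR pid ppid)^[n] {v}).card ≤ pid.length + 1 := by
  have h := Finset.card_le_card (pvIter_bound pid ppid v n)
  have h2 := Finset.card_insert_le v pid.toFinset
  have h3 := pid.toFinset_card_le
  omega

theorem pvIter_grow (pid ppid : List Int) (v : Int) :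
    ∀ n : Nat, (pvStepR pid ppid)^[n+1] {v} = (pvStepR pid ppid)^[n] {v} ∨
      n + 2 ≤ ((pvStepR pid ppid)^[n+1] {v}).card := by
  intro n
  induction n with
  | zero =>
    by_cases h : (pvStepR pid ppid)^[1] {v} = (pvStepR pid ppid)^[0] {v}
    · exact Or.inl h
    · right
      have hsub : ({v} : Finset Int) ⊂ (pvStepR pid ppid)^[1] {v} :=
        Finset.ssubset_iff_subset_ne.mpr ⟨pvIter_le pid ppid v 0 1 (by omega), by
          intro he; exact h he.symm⟩
      have := Finset.card_lt_card hsub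
      simpa using this
  | succ n ih =>
    rcases ih with he | hc
    · left
      calc (pvStepR pid ppid)^[n+1+1] {v}
          = pvStepR pid ppid ((pvStepR pid ppid)^[n+1] {v}) := Function.iterate_succ_apply' ..
        _ = pvStepR pid ppid ((pvStepR pid ppid)^[n] {v}) := by rw [he]
        _ = (pvStepR pid ppid)^[n+1] {v} := (Function.iterate_succ_apply' ..).symm
    · by_cases h : (pvStepR pid ppid)^[n+1+1] {v} = (pvStepR pid ppid)^[n+1] {v}
      · exact Or.inl h
      · right
        have hsub : (pvStepR pid ppid)^[n+1] {v} ⊂ (pvStepR pid ppid)^[n+1+1] {v} :=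
          Finset.ssubset_iff_subset_ne.mpr ⟨pvIter_le pid ppid v (n+1) (n+1+1) (by omega), by
            intro he; exact h he.symm⟩
        have := Finset.card_lt_card hsub
        omega

theorem pvReach_fix (pid ppid : List Int) (v : Int) :
    pvStepR pid ppid (pvReach pid ppid v) = pvReach pid ppid v := by
  have hstab : (pvStepR pid ppid)^[pid.length+1] {v} = (pvStepR pid ppid)^[pid.length] {v} := by
    rcases pvIter_grow pid ppid v pid.length with he | hc
    · exact he
    · exact absurd (pvIter_card pid ppid v (pid.length+1)) (by omega)
  unfold pvReach
  calc pvStepR pid ppid ((pvStepR pid ppid)^[pid.length+1] {v})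
      = pvStepR pid ppid ((pvStepR pid ppid)^[pid.length] {v}) := by rw [hstab]
    _ = (pvStepR pid ppid)^[pid.length+1] {v} := (Function.iterate_succ_apply' ..).symm

theorem pvReach_self (pid ppid : List Int) (v : Int) : v ∈ pvReach pid ppid v := by
  have : ({v} : Finset Int) ⊆ pvReach pid ppid v := pvIter_le pid ppid v 0 (pid.length+1) (by omega)
  exact this (Finset.mem_singleton_self v)

theorem pvReach_closed (pid ppid : List Int) (v x c : Int)
    (hx : x ∈ pvReach pid ppid v) (hc : c ∈ pvChildren pid ppid x) : c ∈ pvReach pid ppid v := by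
  have : c ∈ pvStepR pid ppid (pvReach pid ppid v) := by
    unfold pvStepR
    exact Finset.mem_union_right _ (Finset.mem_biUnion.mpr ⟨x, hx, List.mem_toFinset.mpr hc⟩)
  rwa [pvReach_fix] at this

theorem pvReach_trans (pid ppid : List Int) (v c : Int) (hc : c ∈ pvReach pid ppid v) :
    pvReach pid ppid c ⊆ pvReach pid ppid v := by
  have haux : ∀ n, (pvStepR pid ppid)^[n] {c} ⊆ pvReach pid ppid v := by
    intro n
    induction n with
    | zero => simpa using hc
    | succ n ih =>
      rw [Function.iterate_succ_apply']
      exact (pvStepR_mono pid ppid _ _ ih).trans (by rw [pvReach_fix])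
  exact haux (pid.length+1)

-- rank: the number of processes reachable from v
def pvRk (pid ppid : List Int) (v : Int) : Nat := (pvReach pid ppid v).card

theorem pvRk_pos (pid ppid : List Int) (v : Int) : 1 ≤ pvRk pid ppid v :=
  Finset.card_pos.mpr ⟨v, pvReach_self pid ppid v⟩

theorem pvRk_le (pid ppid : List Int) (v : Int) : pvRk pid ppid v ≤ pid.length + 1 :=
  pvIter_card pid ppid v (pid.length+1)

theorem pvRk_lt (pid ppid : List Int) (kill : Int)
    (hacy : ∀ v ∈ pvReach pid ppid kill, ∀ c ∈ pvChildren pid ppid v, v ∉ pvReach pid ppid c)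
    (v c : Int) (hv : v ∈ pvReach pid ppid kill) (hc : c ∈ pvChildren pid ppid v) :
    c ∈ pvReach pid ppid kill ∧ pvRk pid ppid c < pvRk pid ppid v := by
  refine ⟨pvReach_closed pid ppid kill v c hv hc, ?_⟩
  have hcv : c ∈ pvReach pid ppid v := pvReach_closed pid ppid v v c (pvReach_self ..) hc
  have hsub : pvReach pid ppid c ⊆ pvReach pid ppid v := pvReach_trans pid ppid v c hcv
  have hne : v ∉ pvReach pid ppid c := hacy v hv c hc
  exact Finset.card_lt_card (Finset.ssubset_iff_subset_ne.mpr ⟨hsub, by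
    intro he; exact hne (he ▸ pvReach_self pid ppid v)⟩)

theorem pvChildren_len (pid ppid : List Int) (v : Int) : (pvChildren pid ppid v).length ≤ pid.length := by
  unfold pvChildren
  calc ((((ppid.zip pid)).filter (fun e => e.1 == v)).map (·.2)).length
      = (((ppid.zip pid)).filter (fun e => e.1 == v)).length := List.length_map ..
    _ ≤ (ppid.zip pid).length := List.length_filter_le _ _
    _ ≤ pid.length := by rw [List.length_zip]; omega

-- ===== dict characterisation =====

theorem pvFoldB_getD : ∀ (l : List (Int × Int)) (d0 : PySem.Dict Int (List Int)) (v : Int),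
    (l.foldl (fun d e => d.insert e.1 (d.getD e.1 [] ++ [e.2])) d0).getD v []
      = d0.getD v [] ++ ((l.filter (fun e => e.1 == v)).map (·.2)) := by
  intro l
  induction l with
  | nil => intro d0 v; simp
  | cons e t ih =>
    intro d0 v
    simp only [List.foldl_cons, List.filter_cons]
    rw [ih]
    by_cases hv : e.1 = v
    · simp [hv]
    · have : (e.1 == v) = false := by simpa using hv
      simp [this, PySem.Dict.getD_insert, Ne.symm hv]

theorem pvBuildB_getD (pid ppid : List Int) (v : Int) :
    (pvBuildB pid ppid).getD v [] = pvChildren pid ppid v := by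
  unfold pvBuildB pvChildren
  rw [pvFoldB_getD]
  simp

theorem pvStepA_eq (d : PySem.Dict Int (List Int)) (pp p : Int) :
    pvStepA d pp p = d.insert pp (d.getD pp [] ++ [p]) := by
  unfold pvStepA
  cases h : d.get? pp with
  | none =>
    have hg : d.getD pp [] = [] := by rw [PySem.Dict.getD_eq_get?_getD, h]; rfl
    simp [hg]
  | some l =>
    have hg : d.getD pp [] = l := by rw [PySem.Dict.getD_eq_get?_getD, h]; rfl
    simp [hg]

theorem pvBuildA_idx (pid ppid : List Int) (hlen : pid.length ≤ ppid.length) :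
    ∀ (k : Nat), k ≤ pid.length → ∀ (d0 : PySem.Dict Int (List Int)),
      (PySem.List.pyRange 0 (k : Int) 1).foldl
        (fun d i =>
          let p := PySem.List.pyGetD pid i 0
          let pp := PySem.List.pyGetD ppid i 0
          pvStepA d pp p) d0
      = ((ppid.zip pid).take k).foldl (fun d e => d.insert e.1 (d.getD e.1 [] ++ [e.2])) d0 := by
  intro k
  induction k with
  | zero => intro _ d0; simp [PySem.List.pyRange_one_eq_nil]
  | succ k ih =>
    intro hk d0
    have hkz : k < (ppid.zip pid).length := by rw [List.length_zip]; omega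
    rw [show ((((k : Nat) + 1 : Nat)) : Int) = ((k : Int) + 1) by omega]
    rw [PySem.List.pyRange_one_succ_right (by positivity), List.foldl_append]
    rw [ih (by omega), List.take_add_one, List.getElem?_eq_getElem hkz, List.foldl_append]
    simp only [Option.toList_some, List.foldl_cons, List.foldl_nil]
    rw [List.getElem_zip]
    have hp : PySem.List.pyGetD pid (k : Int) 0 = pid[k]'(by omega) := by
      rw [PySem.List.pyGetD_natCast, List.getD_eq_getElem?_getD,
          List.getElem?_eq_getElem (by omega : k < pid.length)]
      rfl
    have hpp : PySem.List.pyGetD ppid (k : Int) 0 = ppid[k]'(by omega) := by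
      rw [PySem.List.pyGetD_natCast, List.getD_eq_getElem?_getD,
          List.getElem?_eq_getElem (by omega : k < ppid.length)]
      rfl
    show pvStepA _ (PySem.List.pyGetD ppid (k : Int) 0) (PySem.List.pyGetD pid (k : Int) 0) = _
    rw [hp, hpp, pvStepA_eq]

theorem pvBuildA_eq (pid ppid : List Int) (hlen : pid.length ≤ ppid.length) :
    pvBuildA pid ppid = pvBuildB pid ppid := by
  unfold pvBuildA pvBuildB
  rw [pvBuildA_idx pid ppid hlen pid.length le_rfl]
  rw [List.take_of_length_le (by rw [List.length_zip]; omega)]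

-- ===== fuel stability and the stack/recursion correspondence =====

theorem pvFlatMap_congr {f g : Int → List Int} (l : List Int) (h : ∀ x ∈ l, f x = g x) :
    l.flatMap f = l.flatMap g := by
  induction l with
  | nil => rfl
  | cons a t ih =>
    simp only [List.flatMap_cons]
    rw [h a (by simp), ih (fun x hx => h x (by simp [hx]))]

theorem pvCollect_stab (d : PySem.Dict Int (List Int)) (P : Int → Prop) (rk : Int → Nat)
    (H : ∀ v, P v → ∀ c ∈ d.getD v [], P c ∧ rk c < rk v)
    (hpos : ∀ v, P v → 1 ≤ rk v) :
    ∀ k v f1 f2, P v → rk v ≤ k → k ≤ f1 → k ≤ f2 → pvCollect d f1 v = pvCollect d f2 v := by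
  intro k
  induction k using Nat.strong_induction_on with
  | _ k IH =>
    intro v f1 f2 hP hk h1 h2
    have hr := hpos v hP
    obtain ⟨a, rfl⟩ : ∃ a, f1 = a + 1 := ⟨f1 - 1, by omega⟩
    obtain ⟨b, rfl⟩ : ∃ b, f2 = b + 1 := ⟨f2 - 1, by omega⟩
    simp only [pvCollect]
    congr 1
    apply pvFlatMap_congr
    intro c hc
    rw [List.mem_reverse] at hc
    obtain ⟨hPc, hlt⟩ := H v hP c hc
    exact IH (k - 1) (by omega) c a b hPc (by omega) (by omega) (by omega)

theorem pvCollect_len_pos (d : PySem.Dict Int (List Int)) (f : Nat) (v : Int) :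
    1 ≤ (pvCollect d f v).length := by
  cases f <;> simp [pvCollect]

theorem pvCollect_unfold (d : PySem.Dict Int (List Int)) (P : Int → Prop) (rk : Int → Nat) (N : Nat)
    (H : ∀ v, P v → ∀ c ∈ d.getD v [], P c ∧ rk c < rk v)
    (hpos : ∀ v, P v → 1 ≤ rk v)
    (hrk : ∀ v, P v → rk v ≤ N + 1) (v : Int) (hv : P v) :
    pvCollect d (N + 1) v
      = v :: (d.getD v []).reverse.flatMap (pvCollect d (N + 1)) := by
  simp only [pvCollect]
  congr 1
  apply pvFlatMap_congr
  intro c hc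
  rw [List.mem_reverse] at hc
  obtain ⟨hPc, hlt⟩ := H v hv c hc
  have hvN := hrk v hv
  exact pvCollect_stab d P rk H hpos (rk c) c N (N + 1) hPc le_rfl (by omega) (by omega)

theorem pvSz_unfold (d : PySem.Dict Int (List Int)) (P : Int → Prop) (rk : Int → Nat) (N : Nat)
    (H : ∀ v, P v → ∀ c ∈ d.getD v [], P c ∧ rk c < rk v)
    (hpos : ∀ v, P v → 1 ≤ rk v)
    (hrk : ∀ v, P v → rk v ≤ N + 1) (v : Int) (hv : P v) :
    (pvCollect d (N + 1) v).length
      = 1 + ((d.getD v []).map (fun c => (pvCollect d (N + 1) c).length)).sum := by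
  rw [pvCollect_unfold d P rk N H hpos hrk v hv]
  simp only [List.length_cons, List.length_flatMap, List.map_reverse, List.sum_reverse]
  omega

theorem pvML (d : PySem.Dict Int (List Int)) (P : Int → Prop) (rk : Int → Nat) (N : Nat)
    (H : ∀ v, P v → ∀ c ∈ d.getD v [], P c ∧ rk c < rk v)
    (hpos : ∀ v, P v → 1 ≤ rk v)
    (hrk : ∀ v, P v → rk v ≤ N + 1) :
    ∀ (f : Nat) (q res : List Int), (∀ v ∈ q, P v) →
      (q.map (fun v => (pvCollect d (N + 1) v).length)).sum ≤ f →
      pvLoopA d f res q = res ++ q.reverse.flatMap (pvCollect d (N + 1)) := by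
  intro f
  induction f with
  | zero =>
    intro q res hq h
    have hqe : q = [] := by
      rcases List.eq_nil_or_concat q with rfl | ⟨L, b, rfl⟩
      · rfl
      · exfalso
        have h1 := pvCollect_len_pos d (N + 1) b
        rw [List.concat_eq_append, List.map_append, List.sum_append] at h
        simp only [List.map_cons, List.map_nil, List.sum_cons, List.sum_nil] at h
        omega
    subst hqe
    simp [pvLoopA]
  | succ f IH =>
    intro q res hq h
    rcases List.eq_nil_or_concat q with rfl | ⟨q1, p, rfl⟩
    · simp [pvLoopA]
    · rw [List.concat_eq_append] at h hq ⊢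
      rw [List.map_append, List.sum_append] at h
      simp only [List.map_cons, List.map_nil, List.sum_cons, List.sum_nil] at h
      have hPp : P p := hq p (by simp)
      have hq1 : ∀ v ∈ q1, P v := fun v hv => hq v (by simp [hv])
      have hSzp := pvSz_unfold d P rk N H hpos hrk p hPp
      simp only [pvLoopA]
      rw [if_neg (by simp)]
      rw [List.getLast?_concat, List.dropLast_concat]
      simp only [Option.getD_some]
      by_cases hc : d.contains p = true
      · rw [if_pos hc]
        rw [IH (q1 ++ d.getD p []) (res ++ [p])
          (by
            intro v hv
            rcases List.mem_append.mp hv with hv | hv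
            · exact hq1 v hv
            · exact (H p hPp v hv).1)
          (by rw [List.map_append, List.sum_append]; omega)]
        rw [List.reverse_append, List.reverse_append]
        simp only [List.reverse_cons, List.reverse_nil, List.nil_append,
          List.flatMap_append, List.flatMap_cons, List.flatMap_nil]
        rw [pvCollect_unfold d P rk N H hpos hrk p hPp]
        simp [List.append_assoc]
      · have hcf : d.contains p = false := by simpa using hc
        rw [if_neg (by simp [hcf])]
        have h0 : d.get? p = none := by
          cases hqq : d.get? p with
          | none => rfl
          | some l =>
            rw [PySem.Dict.contains_eq_isSome_get?, hqq] at hcf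
            simp at hcf
        have hgd : d.getD p [] = [] := by rw [PySem.Dict.getD_eq_get?_getD, h0]; rfl
        rw [IH q1 (res ++ [p]) hq1 (by rw [hgd] at hSzp; simp at hSzp; omega)]
        rw [List.reverse_append]
        simp only [List.reverse_cons, List.reverse_nil, List.nil_append,
          List.flatMap_append, List.flatMap_cons, List.flatMap_nil]
        rw [pvCollect_unfold d P rk N H hpos hrk p hPp, hgd]
        simp [List.append_assoc]

theorem pvSzB (d : PySem.Dict Int (List Int)) (P : Int → Prop) (rk : Int → Nat) (N : Nat)
    (H : ∀ v, P v → ∀ c ∈ d.getD v [], P c ∧ rk c < rk v)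
    (hpos : ∀ v, P v → 1 ≤ rk v)
    (hrk : ∀ v, P v → rk v ≤ N + 1)
    (hch : ∀ v, (d.getD v []).length ≤ N) :
    ∀ k v, P v → rk v ≤ k → (pvCollect d (N + 1) v).length ≤ (N + 1) ^ k := by
  intro k
  induction k using Nat.strong_induction_on with
  | _ k IH =>
    intro v hP hk
    have hr := hpos v hP
    rw [pvSz_unfold d P rk N H hpos hrk v hP]
    have hX : 1 ≤ (N + 1) ^ (k - 1) := Nat.one_le_pow _ _ (by omega)
    have hsum : ((d.getD v []).map (fun c => (pvCollect d (N + 1) c).length)).sum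
        ≤ (d.getD v []).length * (N + 1) ^ (k - 1) := by
      have := List.sum_le_card_nsmul
        ((d.getD v []).map (fun c => (pvCollect d (N + 1) c).length))
        ((N + 1) ^ (k - 1)) (by
          intro x hx
          obtain ⟨c, hcm, rfl⟩ := List.mem_map.mp hx
          obtain ⟨hPc, hlt⟩ := H v hP c hcm
          exact IH (k - 1) (by omega) c hPc (by omega))
      simpa [smul_eq_mul] using this
    have hlen := hch v
    have hpow : (N + 1) ^ k = (N + 1) ^ (k - 1) * (N + 1) := by
      rw [← pow_succ]
      congr 1
      omega
    have hmul : (d.getD v []).length * (N + 1) ^ (k - 1)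
        ≤ N * (N + 1) ^ (k - 1) :=
      Nat.mul_le_mul_right _ hlen
    have hexp : (N + 1) ^ (k - 1) * (N + 1)
        = N * (N + 1) ^ (k - 1) + (N + 1) ^ (k - 1) := by ring
    omega

theorem killProcess_eq_alt (pid ppid : List Int) (kill : Int)
    (hPre : Pre_killProcess pid ppid kill) :
    killProcess pid ppid kill = killProcess_alt pid ppid kill := by
  obtain ⟨hlen, hacy⟩ := hPre
  unfold killProcess killProcess_alt
  rw [pvBuildA_eq pid ppid hlen]
  set d := pvBuildB pid ppid with hd
  set P : Int → Prop := fun v => v ∈ pvReach pid ppid kill with hP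
  set rk : Int → Nat := pvRk pid ppid with hrk0
  have H : ∀ v, P v → ∀ c ∈ d.getD v [], P c ∧ rk c < rk v := by
    intro v hv c hc
    rw [hd, pvBuildB_getD] at hc
    exact pvRk_lt pid ppid kill hacy v c hv hc
  have hpos : ∀ v, P v → 1 ≤ rk v := fun v _ => pvRk_pos pid ppid v
  have hrk : ∀ v, P v → rk v ≤ pid.length + 1 := fun v _ => pvRk_le pid ppid v
  by_cases hc : d.contains kill = true
  · rw [if_pos hc]
    have hch : ∀ v, (d.getD v []).length ≤ pid.length := by
      intro v
      rw [hd, pvBuildB_getD]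
      exact pvChildren_len pid ppid v
    have hPkill : P kill := pvReach_self pid ppid kill
    have hqP : ∀ v ∈ d.getD kill [], P v := fun v hv => (H kill hPkill v hv).1
    have hbound : ((d.getD kill []).map
        (fun v => (pvCollect d (pid.length + 1) v).length)).sum
        ≤ (pid.length + 1) ^ (pid.length + 1) + 1 := by
      have hone : ∀ x ∈ (d.getD kill []).map
          (fun v => (pvCollect d (pid.length + 1) v).length),
          x ≤ (pid.length + 1) ^ pid.length := by
        intro x hx
        obtain ⟨c, hcm, rfl⟩ := List.mem_map.mp hx
        obtain ⟨hPc, hlt⟩ := H kill hPkill c hcm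
        have hrc : rk c ≤ pid.length := by
          have := hrk kill hPkill
          omega
        exact pvSzB d P rk pid.length H hpos hrk hch pid.length c hPc hrc
      have hsum := List.sum_le_card_nsmul _ _ hone
      have hlenm : ((d.getD kill []).map
          (fun v => (pvCollect d (pid.length + 1) v).length)).length ≤ pid.length := by
        rw [List.length_map]
        exact hch kill
      have hpow : (pid.length + 1) ^ (pid.length + 1)
          = pid.length * (pid.length + 1) ^ pid.length + (pid.length + 1) ^ pid.length := by
        rw [pow_succ]
        ring
      have hmul : ((d.getD kill []).map
          (fun v => (pvCollect d (pid.length + 1) v).length)).length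
            * (pid.length + 1) ^ pid.length
          ≤ pid.length * (pid.length + 1) ^ pid.length :=
        Nat.mul_le_mul_right _ hlenm
      simp only [smul_eq_mul] at hsum
      omega
    rw [pvML d P rk pid.length H hpos hrk ((pid.length + 1) ^ (pid.length + 1) + 1)
      (d.getD kill []) [kill] hqP hbound]
    rw [pvCollect_unfold d P rk pid.length H hpos hrk kill hPkill]
    rfl
  · have hcf : d.contains kill = false := by simpa using hc
    rw [if_neg (by simp [hcf])]
    have h0 : d.get? kill = none := by
      cases hq : d.get? kill with
      | none => rfl
      | some l =>
        rw [PySem.Dict.contains_eq_isSome_get?, hq] at hcf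
        simp at hcf
    have hgd : d.getD kill [] = [] := by rw [PySem.Dict.getD_eq_get?_getD, h0]; rfl
    simp [pvCollect, hgd]

-- ===== VERDICT (by name: the statement is the Claim_ definition above) =====
theorem killProcess_spec : Claim_equal_killProcess := by
  intro pid ppid kill _ hPre
  unfold Spec_killProcess
  exact killProcess_eq_alt pid ppid kill hPre
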